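-- pv_equiv track=rewrite | github.com/abdeljalilf/My-Projects | Biomedical Project/code_une seule deformation.py | deformer
-- ===== SOURCE A (Python) =====
-- def deformer(Xmin,Xmax,Ymax):
--     L=[]
--     x=Xmin
--     y=0
--     while Xmin <= x <= Xmax and y <= Ymax :
--
--         L.append((x,y))
--         if x==Xmax :
--             x=Xmin
--             y+=1
--             continue
--         x+=1
--
--     return L
-- ===== SOURCE B (Python) =====
-- def deformer(Xmin, Xmax, Ymax):
--     w = Xmax - Xmin + 1
--     if w <= 0 or Ymax < 0:
--         return []
--     return [(Xmin + k % w, k // w) for k in range(w * (Ymax + 1))]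
-- ===== Notes on version B (the rewrite author's own statement) =====
-- stated objective: alternative
-- what changed: Replaces A's two-dimensional odometer state machine (x reset / y increment) by a closed-form rank decoding: a single flat index k over 0..w*(Ymax+1) is decoded to (Xmin + k % w, k // w), so no 2-D loop state exists at all.
import Mathlib
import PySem

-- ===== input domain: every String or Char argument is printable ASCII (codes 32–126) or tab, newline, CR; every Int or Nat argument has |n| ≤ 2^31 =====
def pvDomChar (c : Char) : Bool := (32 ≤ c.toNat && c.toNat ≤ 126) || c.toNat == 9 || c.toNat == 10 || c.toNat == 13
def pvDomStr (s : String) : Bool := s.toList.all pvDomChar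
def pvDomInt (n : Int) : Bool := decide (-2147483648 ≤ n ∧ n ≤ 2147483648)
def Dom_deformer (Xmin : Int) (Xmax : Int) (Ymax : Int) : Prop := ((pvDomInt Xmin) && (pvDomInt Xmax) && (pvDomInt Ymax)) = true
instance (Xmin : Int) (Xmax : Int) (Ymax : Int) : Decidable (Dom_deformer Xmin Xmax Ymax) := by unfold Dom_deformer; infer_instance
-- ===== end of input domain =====

-- B replaces A's 2-D odometer state machine by closed-form rank decoding of a single
-- flat index (k ↦ (Xmin + k % w, k // w)); objective: alternative algorithm, same output.

-- ===== PORT A =====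
-- the while loop of A, with state (x, y) and accumulator L; the Nat argument is a
-- fuel bound guaranteeing totality (deformer passes one exceeding the loop's step
-- count, so the loop always stops on its own condition)
def deformerLoop (fuel : Nat) (Xmin Xmax Ymax x y : Int) (L : List (Int × Int)) : List (Int × Int) :=
  match fuel with
  | 0 => L
  | fuel + 1 =>
    if Xmin ≤ x ∧ x ≤ Xmax ∧ y ≤ Ymax then
      if x = Xmax then
        deformerLoop fuel Xmin Xmax Ymax Xmin (y + 1) (L ++ [(x, y)])
      else
        deformerLoop fuel Xmin Xmax Ymax (x + 1) y (L ++ [(x, y)])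
    else L

def deformer (Xmin : Int) (Xmax : Int) (Ymax : Int) : List (Int × Int) :=
  deformerLoop ((Ymax + 1).toNat * (Xmax + 1 - Xmin).toNat + (Xmax - Xmin).toNat + 1)
    Xmin Xmax Ymax Xmin 0 []

-- ===== PORT B =====
-- w = Xmax - Xmin + 1; empty if w ≤ 0 or Ymax < 0, else
-- [(Xmin + k % w, k // w) for k in range(w * (Ymax + 1))]
def deformer_alt (Xmin : Int) (Xmax : Int) (Ymax : Int) : List (Int × Int) :=
  let w := Xmax - Xmin + 1
  if w ≤ 0 ∨ Ymax < 0 then []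
  else
    (PySem.List.pyRange 0 (w * (Ymax + 1)) 1).map
      (fun k => (Xmin + PySem.Int.mod k w, PySem.Int.floordiv k w))

-- ===== PRECONDITION & SPEC =====
def Spec_deformer (Xmin : Int) (Xmax : Int) (Ymax : Int) (out : List (Int × Int)) : Prop := out = deformer_alt Xmin Xmax Ymax
instance (Xmin : Int) (Xmax : Int) (Ymax : Int) (out : List (Int × Int)) : Decidable (Spec_deformer Xmin Xmax Ymax out) := by unfold Spec_deformer; infer_instance

-- ===== CLAIM (what is proved, stated in full; the proofs are below) =====
def Claim_equal_deformer : Prop := ∀ (Xmin : Int) (Xmax : Int) (Ymax : Int), Dom_deformer Xmin Xmax Ymax → Spec_deformer Xmin Xmax Ymax (deformer Xmin Xmax Ymax)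

-- ===== LEMMAS AND PROOFS =====

-- the tail of the grid from row y on (row-major flatMap form, used as the common middle ground)
def gridFrom (Xmin Xmax Ymax y : Int) : List (Int × Int) :=
  (PySem.List.pyRange y (Ymax + 1) 1).flatMap (fun b =>
    (PySem.List.pyRange Xmin (Xmax + 1) 1).map (fun x => (x, b)))

lemma deformerLoop_eq (Xmin Xmax Ymax : Int) :
    ∀ (fuel : Nat) (x y : Int) (L : List (Int × Int)),
      (Ymax + 1 - y).toNat * (Xmax + 1 - Xmin).toNat + (Xmax - x).toNat < fuel →
      deformerLoop fuel Xmin Xmax Ymax x y L =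
        L ++ (if Xmin ≤ x ∧ x ≤ Xmax ∧ y ≤ Ymax then
          (PySem.List.pyRange x (Xmax + 1) 1).map (fun a => (a, y)) ++
            gridFrom Xmin Xmax Ymax (y + 1)
        else []) := by
  intro fuel
  induction fuel with
  | zero => intro x y L hf; omega
  | succ fuel ih =>
    intro x y L hf
    show (if Xmin ≤ x ∧ x ≤ Xmax ∧ y ≤ Ymax then _ else L) = _
    by_cases h : Xmin ≤ x ∧ x ≤ Xmax ∧ y ≤ Ymax
    · rw [if_pos h, if_pos h]
      by_cases hx : x = Xmax
      · subst hx
        rw [if_pos rfl]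
        rw [ih Xmin (y + 1) (L ++ [(x, y)]) (by
          have h1 : (Ymax + 1 - y).toNat = (Ymax + 1 - (y + 1)).toNat + 1 := by omega
          rw [h1, Nat.succ_mul] at hf
          generalize (Ymax + 1 - (y + 1)).toNat * (x + 1 - Xmin).toNat = p at *
          omega)]
        rw [PySem.List.pyRange_one_cons (by omega : x < x + 1),
            PySem.List.pyRange_one_eq_nil (le_refl (x + 1))]
        by_cases hy : Xmin ≤ Xmin ∧ Xmin ≤ x ∧ y + 1 ≤ Ymax
        · rw [if_pos hy]
          unfold gridFrom
          rw [PySem.List.pyRange_one_cons (by omega : y + 1 < Ymax + 1)]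
          simp
        · rw [if_neg hy]
          have hXm : Xmin ≤ x := h.1
          simp [gridFrom, PySem.List.pyRange_one_eq_nil (by omega : Ymax + 1 ≤ y + 1)]
      · rw [if_neg hx]
        rw [ih (x + 1) y (L ++ [(x, y)]) (by
          generalize (Ymax + 1 - y).toNat * (Xmax + 1 - Xmin).toNat = p at *
          omega)]
        rw [if_pos (by omega : Xmin ≤ x + 1 ∧ x + 1 ≤ Xmax ∧ y ≤ Ymax)]
        rw [PySem.List.pyRange_one_cons (by omega : x < Xmax + 1)]
        simp
    · rw [if_neg h, if_neg h, List.append_nil]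

-- decoding one row: the k-range [w*n, w*n+w) decodes to row n
lemma row_decode (Xmin w : Int) (hw : 0 < w) (n : Int) :
    (PySem.List.pyRange (w * n) (w * n + w) 1).map
        (fun k => (Xmin + PySem.Int.mod k w, PySem.Int.floordiv k w)) =
      (PySem.List.pyRange Xmin (Xmin + w) 1).map (fun x => (x, n)) := by
  rw [PySem.List.pyRange_one (w * n) (w * n + w), PySem.List.pyRange_one Xmin (Xmin + w)]
  simp only [add_sub_cancel_left, List.map_map]
  refine List.map_congr_left ?_
  intro j hj
  have hj' : (j : Int) < w := by
    have := List.mem_range.mp hj; omega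
  have hdiv : PySem.Int.floordiv (w * n + j) w = n := by
    rw [PySem.Int.floordiv_eq_iff_of_pos hw]
    constructor <;> nlinarith [Int.natCast_nonneg j]
  have hmod : PySem.Int.mod (w * n + j) w = j := by
    have h := PySem.Int.floordiv_mul_add_mod (w * n + j) w
    rw [hdiv] at h
    have hc : n * w = w * n := mul_comm n w
    omega
  simp [Function.comp, hdiv, hmod]

-- the whole flat-index decoding equals the row-major flatMap grid
lemma indexmap_eq (Xmin w : Int) (hw : 0 < w) : ∀ (n : Nat),
    (PySem.List.pyRange 0 (w * n) 1).map
        (fun k => (Xmin + PySem.Int.mod k w, PySem.Int.floordiv k w)) =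
      (PySem.List.pyRange 0 (n : Int) 1).flatMap (fun y =>
        (PySem.List.pyRange Xmin (Xmin + w) 1).map (fun x => (x, y))) := by
  intro n
  induction n with
  | zero => simp [PySem.List.pyRange_one_eq_nil]
  | succ n ih =>
    have h1 : ((n : Int) + 1) * w = w * n + w := by ring
    rw [show ((n + 1 : Nat) : Int) = (n : Int) + 1 by push_cast; ring]
    rw [show w * ((n : Int) + 1) = w * n + w by ring]
    rw [PySem.List.pyRange_one_append 0 (w * n) (w * n + w)
          (by positivity) (by omega),
        PySem.List.pyRange_one_succ_right (by positivity : (0:Int) ≤ n)]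
    rw [List.map_append, List.flatMap_append, ih]
    simp [row_decode Xmin w hw n]

-- ===== VERDICT (by name: the statement is the Claim_ definition above) =====
theorem deformer_spec : Claim_equal_deformer := by
  intro Xmin Xmax Ymax _
  unfold Spec_deformer deformer deformer_alt
  rw [deformerLoop_eq Xmin Xmax Ymax _ Xmin 0 [] (by
        rw [show Ymax + 1 - 0 = Ymax + 1 from by ring]
        exact Nat.lt_succ_self _),
      List.nil_append]
  set w : Int := Xmax - Xmin + 1 with hw
  by_cases hdeg : w ≤ 0 ∨ Ymax < 0
  · rw [if_pos hdeg, if_neg (by omega : ¬(Xmin ≤ Xmin ∧ Xmin ≤ Xmax ∧ 0 ≤ Ymax))]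
  · push Not at hdeg
    rw [if_neg (by omega : ¬(w ≤ 0 ∨ Ymax < 0)),
        if_pos (by omega : Xmin ≤ Xmin ∧ Xmin ≤ Xmax ∧ 0 ≤ Ymax)]
    have hn : (Ymax + 1) = (((Ymax + 1).toNat : Nat) : Int) := by omega
    rw [show w * (Ymax + 1) = w * (((Ymax + 1).toNat : Nat) : Int) by rw [← hn]]
    rw [indexmap_eq Xmin w (by omega) (Ymax + 1).toNat]
    rw [← hn, show Xmin + w = Xmax + 1 by omega]
    show _ = gridFrom Xmin Xmax Ymax 0
    unfold gridFrom
    rw [PySem.List.pyRange_one_cons (by omega : (0:Int) < Ymax + 1)]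
    simp
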